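-- pv_equiv track=rewrite | github.com/pastly/python-snippits | src/paragraph-wrap.py | split_x_by_y
-- ===== SOURCE A (Python) =====
-- def split_x_by_y(x, y):
--     ''' Divide X as evenly as possible Y ways using only ints, and return those
--     ints. Consider x=5 and y=3. 5 cannot be divided into 3 pieces evenly using
--     ints. This function would yield a generator producing 1, 2, 2.
--
--     x=8, y=5 yields 1, 2, 1, 2, 2.
--     x=6, y=3 yields 2, 2, 2
--     '''
--     frac_accum = 0
--     for iters_left in range(y-1, 0-1, -1):
--         frac_accum += x % y
--         if frac_accum >= y or not iters_left and frac_accum: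
--             yield x // y + 1
--         else:
--             yield x // y
--         if frac_accum >= y:
--             frac_accum -= y
-- ===== SOURCE B (Python) =====
-- def split_x_by_y(x, y):
--     ''' Divide X as evenly as possible Y ways using only ints (stateless
--     closed-form remainder distribution; same sequence as the accumulator
--     version). '''
--     for i in range(y):
--         yield x // y + ((i + 1) * (x % y)) // y - (i * (x % y)) // y
-- ===== Notes on version B (the rewrite author's own statement) =====
-- stated objective: alternative
-- what changed: Replaces the running frac_accum accumulator and its carry/subtract logic with a stateless closed-form Bresenham distribution: element i is computed directly as x//y + ((i+1)*(x%y))//y - (i*(x%y))//y.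
import Mathlib
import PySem

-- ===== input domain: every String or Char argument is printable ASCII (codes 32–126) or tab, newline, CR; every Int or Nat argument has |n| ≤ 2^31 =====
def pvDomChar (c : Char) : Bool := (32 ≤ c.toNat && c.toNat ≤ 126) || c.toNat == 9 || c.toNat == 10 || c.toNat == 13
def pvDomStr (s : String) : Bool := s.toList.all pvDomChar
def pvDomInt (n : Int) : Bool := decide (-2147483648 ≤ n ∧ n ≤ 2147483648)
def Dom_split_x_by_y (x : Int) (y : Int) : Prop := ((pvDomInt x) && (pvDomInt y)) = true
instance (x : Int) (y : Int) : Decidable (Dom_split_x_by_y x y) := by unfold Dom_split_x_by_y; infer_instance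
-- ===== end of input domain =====

-- B replaces A's running frac_accum accumulator with a stateless closed-form
-- (Bresenham-style) per-index formula; same O(y) cost, alternative algorithm.


-- ===== PORT A =====
-- loop body of A: state = (frac_accum, yielded-so-far)
def splitBody (x : Int) (y : Int) (st : Int × List Int) (iters_left : Int) : Int × List Int :=
  let frac_accum := st.1 + PySem.Int.mod x y
  let acc := if frac_accum ≥ y ∨ (iters_left = 0 ∧ ¬ frac_accum = 0)
             then st.2 ++ [PySem.Int.floordiv x y + 1]
             else st.2 ++ [PySem.Int.floordiv x y]
  if frac_accum ≥ y then (frac_accum - y, acc) else (frac_accum, acc)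

def split_x_by_y (x : Int) (y : Int) : List Int :=
  ((PySem.List.pyRange (y - 1) (0 - 1) (-1)).foldl (splitBody x y) (0, [])).2

-- ===== PORT B =====
def split_x_by_y_alt (x : Int) (y : Int) : List Int :=
  (PySem.List.pyRange 0 y 1).map (fun i =>
    PySem.Int.floordiv x y + PySem.Int.floordiv ((i + 1) * PySem.Int.mod x y) y
      - PySem.Int.floordiv (i * PySem.Int.mod x y) y)

-- ===== PRECONDITION & SPEC =====
def Spec_split_x_by_y (x : Int) (y : Int) (out : List Int) : Prop := out = split_x_by_y_alt x y
instance (x : Int) (y : Int) (out : List Int) : Decidable (Spec_split_x_by_y x y out) := by unfold Spec_split_x_by_y; infer_instance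

-- ===== CLAIM (what is proved, stated in full; the proofs are below) =====
def Claim_equal_split_x_by_y : Prop := ∀ (x : Int) (y : Int), Dom_split_x_by_y x y → Spec_split_x_by_y x y (split_x_by_y x y)

-- ===== LEMMAS AND PROOFS =====

-- invariant run of A's loop: with frac_accum = (i*r) mod y and n iterations left
-- (i = y - n), the loop appends exactly B's closed-form values for indices i..y-1.
theorem splitLoop_eq (x y : Int) (hy : 0 < y) :
    ∀ (n : Nat), (n : Int) ≤ y → ∀ (f : Int) (acc : List Int),
      f = PySem.Int.mod ((y - n) * PySem.Int.mod x y) y →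
      ((PySem.List.pyRange ((n : Int) - 1) (0 - 1) (-1)).foldl (splitBody x y) (f, acc)).2
        = acc ++ (PySem.List.pyRange (y - n) y 1).map (fun i =>
            PySem.Int.floordiv x y + PySem.Int.floordiv ((i + 1) * PySem.Int.mod x y) y
              - PySem.Int.floordiv (i * PySem.Int.mod x y) y) := by
  intro n
  induction n with
  | zero =>
      intro _ f acc _
      rw [PySem.List.pyRange_neg_one_eq_nil (by norm_num)]
      rw [PySem.List.pyRange_one_eq_nil (by norm_num)]
      simp
  | succ n ih =>
      intro hn f acc hf
      set r := PySem.Int.mod x y with hr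
      set q := PySem.Int.floordiv x y with hq
      have hr0 : 0 ≤ r := PySem.Int.mod_nonneg x hy
      have hr1 : r < y := PySem.Int.mod_lt x hy
      set i : Int := y - (n + 1 : Nat) with hi
      have hiy : i + 1 = y - (n : Nat) := by push_cast [hi]; ring
      -- f bounds and the floordiv/mod decomposition of i*r
      have hf0 : 0 ≤ f := by rw [hf]; exact PySem.Int.mod_nonneg _ hy
      have hf1 : f < y := by rw [hf]; exact PySem.Int.mod_lt _ hy
      set d : Int := PySem.Int.floordiv (i * r) y with hd
      have hdec : d * y + f = i * r := by rw [hf, hd]; exact PySem.Int.floordiv_mul_add_mod _ _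
      -- unfold one loop step
      rw [show ((n + 1 : Nat) : Int) - 1 = (n : Int) by push_cast; ring]
      rw [PySem.List.pyRange_neg_one_cons (by omega : (0 : Int) - 1 < (n : Int))]
      rw [List.foldl_cons]
      -- the last-step disjunct is redundant: on the last step y ∣ f + r
      have hcond : (f + r ≥ y ∨ ((n : Int) = 0 ∧ ¬ f + r = 0)) ↔ f + r ≥ y := by
        constructor
        · rintro (h | ⟨hn0, hne⟩)
          · exact h
          · -- n = 0: i = y - 1, so f + r = y * (r - d); being in [0, 2y) it is 0 or ≥ y
            by_contra hlt
            rw [ge_iff_le, not_le] at hlt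
            have hiy1 : i = y - 1 := by rw [hi]; push_cast; omega
            have hmul : f + r = y * (r - d) := by
              have : d * y + f = (y - 1) * r := by rw [← hiy1]; exact hdec
              nlinarith
            rcases lt_trichotomy (r - d) 0 with h1 | h1 | h1
            · nlinarith
            · exact hne (by rw [hmul, h1, mul_zero])
            · nlinarith
        · exact Or.inl
      -- value yielded this step equals B's closed form at index i
      have hdiv1 : f + r ≥ y →
          PySem.Int.floordiv ((i + 1) * r) y = d + 1 := by
        intro h
        rw [PySem.Int.floordiv_eq_iff_of_pos hy]
        constructor <;> nlinarith
      have hdiv2 : f + r < y →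
          PySem.Int.floordiv ((i + 1) * r) y = d := by
        intro h
        rw [PySem.Int.floordiv_eq_iff_of_pos hy]
        constructor <;> nlinarith
      -- new accumulator equals the invariant at index i+1
      have hmodstep : ∀ g : Int, 0 ≤ g → g < y → (i + 1) * r = g + y * (d + (if f + r ≥ y then 1 else 0)) →
          g = PySem.Int.mod ((i + 1) * r) y := by
        intro g hg0 hg1 hgeq
        rw [PySem.Int.mod_eq_emod_of_pos hy, hgeq, Int.add_mul_emod_self_left,
          Int.emod_eq_of_lt hg0 hg1]
      -- RHS: peel the head of the ascending range
      rw [PySem.List.pyRange_one_cons (by rw [hi]; omega : i < y), List.map_cons]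
      -- case split on the carry
      by_cases hge : f + r ≥ y
      · have hbody : splitBody x y (f, acc) (n : Int)
            = (f + r - y, acc ++ [q + 1]) := by
          simp only [splitBody, ← hr, ← hq]
          rw [if_pos (hcond.mpr hge), if_pos hge]
        rw [hbody]
        rw [ih (by omega) (f + r - y) (acc ++ [q + 1])
          (by rw [← hiy]
              exact hmodstep (f + r - y) (by omega) (by omega)
                (by rw [if_pos hge]; nlinarith))]
        have hv : q + PySem.Int.floordiv ((i + 1) * r) y - PySem.Int.floordiv (i * r) y
            = q + 1 := by rw [hdiv1 hge, ← hd]; ring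
        rw [hiy] at hv ⊢
        rw [hv]
        simp
      · rw [ge_iff_le, not_le] at hge
        have hbody : splitBody x y (f, acc) (n : Int)
            = (f + r, acc ++ [q]) := by
          simp only [splitBody, ← hr, ← hq, hcond]
          rw [if_neg (by omega : ¬ f + r ≥ y), if_neg (by omega : ¬ f + r ≥ y)]
        rw [hbody]
        rw [ih (by omega) (f + r) (acc ++ [q])
          (by rw [← hiy]
              exact hmodstep (f + r) (by omega) hge
                (by rw [if_neg (by omega)]; nlinarith))]
        have hv : q + PySem.Int.floordiv ((i + 1) * r) y - PySem.Int.floordiv (i * r) y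
            = q := by rw [hdiv2 hge, ← hd]; ring
        rw [hiy] at hv ⊢
        rw [hv]
        simp

-- ===== VERDICT (by name: the statement is the Claim_ definition above) =====
theorem split_x_by_y_spec : Claim_equal_split_x_by_y := by
  intro x y _
  unfold Spec_split_x_by_y split_x_by_y split_x_by_y_alt
  by_cases hy : 0 < y
  · have h := splitLoop_eq x y hy y.toNat (by omega) 0 []
      (by rw [show y - (y.toNat : Int) = 0 by omega, zero_mul,
              PySem.Int.mod_eq_emod_of_pos hy, Int.zero_emod])
    rw [show ((y.toNat : Int) - 1) = y - 1 by omega] at h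
    rw [show y - (y.toNat : Int) = 0 by omega] at h
    simpa using h
  · rw [not_lt] at hy
    rw [PySem.List.pyRange_neg_one_eq_nil (by omega)]
    rw [PySem.List.pyRange_one_eq_nil (by omega)]
    simp
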